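-- pv_equiv track=rewrite | github.com/sats17/Problem-Solving-Practice | ProblemSolving/FileRenaming.py | renameFile
-- ===== SOURCE A (Python) =====
-- def renameFile(newName, oldName):
--     """
--     This will give answers for only consecutive characters are allowed to delete.
--     Like if we have newFileName abc, and old is abcba then only (abc)ba can get delete here because it is consecutive.
--     """
--     diffNum = len(oldName) - len(newName)
--     count = 0
--     for i in range(0, len(oldName)):
--         modifiedOldName = ""
--         for j in range(len(oldName)):
--             arr = []
--             for num in range(diffNum):
--                 arr.append(i + num)
--             if j not in arr:
--                 modifiedOldName = modifiedOldName + oldName[j]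
--         if newName == modifiedOldName:
--             count = count + 1
--     return count
-- ===== SOURCE B (Python) =====
-- def _cpl(a, b):
--     # length of the common prefix of sequences a and b
--     k = 0
--     for x, y in zip(a, b):
--         if x != y:
--             break
--         k += 1
--     return k
--
--
-- def renameFile(newName, oldName):
--     # O(n): count start positions i (0 <= i < len(oldName)) at which deleting the
--     # consecutive block oldName[i:i+d] yields newName, via common prefix/suffix lengths.
--     d = len(oldName) - len(newName)
--     if d < 0:
--         return 0
--     p = _cpl(newName, oldName)
--     s = _cpl(newName[::-1], oldName[::-1])
--     lo = max(0, len(newName) - s)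
--     hi = min(p, len(oldName) - d, len(oldName) - 1)
--     return hi - lo + 1 if lo <= hi else 0
-- ===== Notes on version B (the rewrite author's own statement) =====
-- stated objective: faster
-- what changed: Replaces the triple loop (rebuilding the deleted-index list and the modified string for every start position) with common prefix/suffix lengths and a closed-form count of valid deletion-window start positions.
import Mathlib
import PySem

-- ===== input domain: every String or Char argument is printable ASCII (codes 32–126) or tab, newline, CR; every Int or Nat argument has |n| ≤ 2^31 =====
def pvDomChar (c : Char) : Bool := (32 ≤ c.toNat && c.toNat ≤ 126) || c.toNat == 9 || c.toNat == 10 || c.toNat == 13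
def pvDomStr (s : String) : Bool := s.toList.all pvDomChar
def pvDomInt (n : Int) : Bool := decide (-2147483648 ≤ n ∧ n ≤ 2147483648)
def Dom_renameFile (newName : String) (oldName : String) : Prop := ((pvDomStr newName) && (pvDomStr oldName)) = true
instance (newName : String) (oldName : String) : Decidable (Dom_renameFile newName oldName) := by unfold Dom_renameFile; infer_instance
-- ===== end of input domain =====

-- B replaces A's cubic triple loop by an O(n) closed-form count of valid deletion-window
-- start positions computed from common prefix/suffix lengths; return values proved equal.


-- ===== PORT A =====
-- literal transliteration of A: for each i, rebuild the index list `arr` and the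
-- modified string character by character, then compare with newName.
def renameFile (newName : String) (oldName : String) : Int :=
  let o := oldName.toList
  let diffNum : Int := (o.length : Int) - (newName.toList.length : Int)
  (List.range o.length).foldl
    (fun (count : Int) (i : Nat) =>
      let modifiedOldName : List Char :=
        (List.range o.length).foldl
          (fun (m : List Char) (j : Nat) =>
            let arr : List Int := (PySem.List.pyRange 0 diffNum 1).map (fun num => (i : Int) + num)
            if (j : Int) ∈ arr then m else m ++ [o[j]!])
          []
      if newName.toList = modifiedOldName then count + 1 else count)
    (0 : Int)

-- ===== PORT B =====
-- B-side helper: common prefix length (Source B's _cpl zip loop, as structural recursion)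
def cplChar : List Char → List Char → Nat
  | a :: as, b :: bs => if a = b then cplChar as bs + 1 else 0
  | _, _ => 0

def renameFile_alt (newName : String) (oldName : String) : Int :=
  let n := newName.toList
  let o := oldName.toList
  let d : Int := (o.length : Int) - (n.length : Int)
  if d < 0 then 0
  else
    let p : Int := cplChar n o
    let s : Int := cplChar n.reverse o.reverse
    let lo : Int := max 0 ((n.length : Int) - s)
    let hi : Int := min (min p ((o.length : Int) - d)) ((o.length : Int) - 1)
    if lo ≤ hi then hi - lo + 1 else 0

-- ===== PRECONDITION & SPEC =====
def Spec_renameFile (newName : String) (oldName : String) (out : Int) : Prop := out = renameFile_alt newName oldName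
instance (newName : String) (oldName : String) (out : Int) : Decidable (Spec_renameFile newName oldName out) := by unfold Spec_renameFile; infer_instance

-- ===== CLAIM (what is proved, stated in full; the proofs are below) =====
def Claim_equal_renameFile : Prop := ∀ (newName : String) (oldName : String), Dom_renameFile newName oldName → Spec_renameFile newName oldName (renameFile newName oldName)

-- ===== LEMMAS AND PROOFS =====

-- cplChar is at most the length of its first argument
theorem cplChar_le_left (a b : List Char) : cplChar a b ≤ a.length := by
  induction a generalizing b with
  | nil => simp [cplChar]
  | cons x xs ih =>
    cases b with
    | nil => simp [cplChar]
    | cons y ys =>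
      by_cases h : x = y <;> simp [cplChar, h]
      exact ih ys

-- k ≤ cplChar a b iff the first k characters agree (and both are long enough)
theorem le_cplChar_iff (a b : List Char) (k : Nat) :
    k ≤ cplChar a b ↔ k ≤ a.length ∧ k ≤ b.length ∧ a.take k = b.take k := by
  induction a generalizing b k with
  | nil => cases k <;> simp [cplChar]
  | cons x xs ih =>
    cases b with
    | nil => cases k <;> simp [cplChar]
    | cons y ys =>
      cases k with
      | zero => simp
      | succ k =>
        by_cases h : x = y
        · subst h
          simp [cplChar, ih ys k]
        · simp [cplChar, h]
  
-- counting fold (A's outer loop) = countP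
theorem foldl_count_eq (P : Nat → Prop) [DecidablePred P] (l : List Nat) (c : Int) :
    l.foldl (fun c i => if P i then c + 1 else c) c
      = c + l.countP (fun i => decide (P i)) := by
  induction l generalizing c with
  | nil => simp
  | cons x xs ih =>
    by_cases h : P x
    · simp [h, ih]
      push_cast
      ring
    · simp [h, ih]

-- the inner fold appends exactly the kept characters
theorem foldl_build_eq (f : Nat → Char) (P : Nat → Prop) [DecidablePred P] (L : Nat)
    (acc : List Char) :
    (List.range L).foldl (fun m j => if P j then m else m ++ [f j]) acc
      = acc ++ ((List.range L).filter (fun j => !decide (P j))).map f := by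
  induction L generalizing acc with
  | zero => simp
  | succ L ih =>
    rw [List.range_succ]
    simp only [List.foldl_append, List.filter_append, List.map_append, List.foldl_cons,
      List.foldl_nil]
    by_cases h : P L <;> simp [h, ih]

-- the inner fold with no deleted indices appends every character
theorem foldl_append_all (f : Nat → Char) (L : Nat) (acc : List Char) :
    (List.range L).foldl (fun m j => m ++ [f j]) acc = acc ++ (List.range L).map f := by
  induction L generalizing acc with
  | zero => simp
  | succ L ih =>
    rw [List.range_succ]
    simp [ih]

-- range' mapped through getElem! is a slice
theorem map_getElem!_range' (o : List Char) (a k : Nat) (h : a + k ≤ o.length) :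
    (List.range' a k).map (fun j => o[j]!) = (o.drop a).take k := by
  apply List.ext_getElem
  · simp; omega
  · intro i h1 h2
    simp only [List.getElem_map, List.getElem_range', Nat.one_mul]
    rw [List.getElem_take, List.getElem_drop]
    rw [getElem!_pos o (a + i) (by simp at h1 ⊢; omega)]

-- splitting List.range at two points
theorem range_split (L i m : Nat) (h1 : i ≤ m) (h2 : m ≤ L) :
    List.range L = (List.range' 0 i ++ List.range' i (m - i)) ++ List.range' m (L - m) := by
  have hr : ∀ (s a b : Nat), List.range' s (a + b) = List.range' s a ++ List.range' (s + a) b := by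
    intro s a b
    rw [← List.range'_append]
    simp
  rw [List.range_eq_range', show L = (i + (m - i)) + (L - m) by omega,
    hr 0 (i + (m - i)) (L - m), hr 0 i (m - i)]
  simp only [Nat.zero_add]
  congr 2 <;> omega

-- the modified string for start position i deletes the window o[i .. i+dn)
theorem modified_eq (o : List Char) (i dn : Nat) (hi : i < o.length) :
    ((List.range o.length).filter
        (fun j => !decide (i ≤ j ∧ j < i + dn))).map (fun j => o[j]!)
      = o.take i ++ o.drop (i + dn) := by
  set L := o.length with hL
  set m := min (i + dn) L with hm
  rw [range_split L i m (by omega) (by omega)]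
  simp only [List.filter_append, List.map_append]
  have hf1 : (List.range' 0 i).filter (fun j => !decide (i ≤ j ∧ j < i + dn))
      = List.range' 0 i := by
    rw [List.filter_eq_self]
    intro a ha
    rw [List.mem_range'_1] at ha
    simp only [Bool.not_eq_eq_eq_not, Bool.not_true, decide_eq_false_iff_not]
    omega
  have hf2 : (List.range' i (m - i)).filter (fun j => !decide (i ≤ j ∧ j < i + dn)) = [] := by
    rw [List.filter_eq_nil_iff]
    intro a ha
    rw [List.mem_range'_1] at ha
    simp only [Bool.not_eq_eq_eq_not, Bool.not_true, decide_eq_false_iff_not, not_not]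
    omega
  have hf3 : (List.range' m (L - m)).filter (fun j => !decide (i ≤ j ∧ j < i + dn))
      = List.range' m (L - m) := by
    rw [List.filter_eq_self]
    intro a ha
    rw [List.mem_range'_1] at ha
    simp only [Bool.not_eq_eq_eq_not, Bool.not_true, decide_eq_false_iff_not]
    omega
  rw [hf1, hf2, hf3]
  have e1 : (List.range' 0 i).map (fun j => o[j]!) = o.take i := by
    rw [map_getElem!_range' o 0 i (by omega)]
    simp
  have e3 : (List.range' m (L - m)).map (fun j => o[j]!) = o.drop (i + dn) := by
    rw [map_getElem!_range' o m (L - m) (by omega)]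
    rcases Nat.le_total (i + dn) L with h | h
    · have hmeq : m = i + dn := by omega
      rw [hmeq, List.take_of_length_le (by simp [hL])]
    · have hmeq : m = L := by omega
      rw [hmeq, List.drop_of_length_le (by omega), List.drop_of_length_le (by omega)]
      simp
  rw [e1, e3]
  simp

-- characterisation of "deleting the window at i yields n"
theorem window_iff (n o : List Char) (dn i : Nat) (hlen : o.length = n.length + dn)
    (hi : i < o.length) :
    (n = o.take i ++ o.drop (i + dn)) ↔
      (i ≤ n.length ∧ i ≤ cplChar n o ∧ n.length - cplChar n.reverse o.reverse ≤ i) := by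
  constructor
  · intro h
    have hlen2 := congrArg List.length h
    simp only [List.length_append, List.length_take, List.length_drop] at hlen2
    have hiN : i ≤ n.length := by omega
    have htake : n.take i = o.take i := by
      rw [h, List.take_append, List.length_take, Nat.min_eq_left hi.le, Nat.sub_self,
        List.take_zero, List.append_nil, List.take_take, Nat.min_self]
    have hsuf : n.reverse.take (n.length - i) = o.reverse.take (n.length - i) := by
      set k := n.length - i with hk
      have hlx : (o.drop (i + dn)).length = k := by
        simp only [List.length_drop]; omega
      have hrev : n.reverse = (o.drop (i + dn)).reverse ++ (o.take i).reverse := by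
        rw [h, List.reverse_append]
      rw [hrev, List.take_append, List.length_reverse, hlx, Nat.sub_self,
        List.take_zero, List.append_nil,
        List.take_of_length_le (by rw [List.length_reverse, hlx]), List.reverse_drop]
      congr 1
      omega
    refine ⟨hiN, ?_, ?_⟩
    · exact (le_cplChar_iff n o i).2 ⟨hiN, hi.le, htake⟩
    · have := (le_cplChar_iff n.reverse o.reverse (n.length - i)).2
        ⟨by simp, by simp; omega, hsuf⟩
      omega
  · rintro ⟨hiN, hp, hs⟩
    have htake : n.take i = o.take i := ((le_cplChar_iff n o i).1 hp).2.2
    have hsuf : n.reverse.take (n.length - i) = o.reverse.take (n.length - i) :=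
      ((le_cplChar_iff n.reverse o.reverse (n.length - i)).1 (by omega)).2.2
    have hdrop : n.drop i = o.drop (i + dn) := by
      have e1 : n.reverse.take (n.length - i) = (n.drop i).reverse := by
        rw [List.take_reverse]
        congr 2
        omega
      have e2 : o.reverse.take (n.length - i) = (o.drop (i + dn)).reverse := by
        rw [List.take_reverse]
        congr 2
        omega
      have := hsuf
      rw [e1, e2] at this
      exact List.reverse_injective this
    calc n = n.take i ++ n.drop i := (List.take_append_drop i n).symm
      _ = o.take i ++ o.drop (i + dn) := by rw [htake, hdrop]

-- counting an interval inside range L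
theorem countP_interval (L a b : Nat) :
    (List.range L).countP (fun i => decide (a ≤ i ∧ i ≤ b))
      = min (b + 1) L - min a (min (b + 1) L) := by
  induction L with
  | zero => simp
  | succ L ih =>
    rw [List.range_succ, List.countP_append, ih]
    by_cases h : a ≤ L ∧ L ≤ b <;> simp [h] <;> omega

-- the central equality of the two ports
theorem core_eq (newName oldName : String) :
    renameFile newName oldName = renameFile_alt newName oldName := by
  simp only [renameFile, renameFile_alt]
  set n := newName.toList with hn
  set o := oldName.toList with ho
  by_cases hd : ((o.length : Int) - (n.length : Int)) < 0
  · -- diffNum < 0: arr is always empty, the modified string is o itself, never equal to n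
    rw [if_pos hd]
    rw [PySem.List.pyRange_one_eq_nil (by omega)]
    have hmod : ∀ i : Nat,
        (List.range o.length).foldl
          (fun (m : List Char) (j : Nat) =>
            if (j : Int) ∈ (List.map (fun num => (i : Int) + num) []) then m else m ++ [o[j]!])
          [] = o := by
      intro i
      simp only [List.map_nil, List.not_mem_nil, if_false]
      rw [foldl_append_all (fun j => o[j]!) o.length [], List.nil_append,
        List.range_eq_range', map_getElem!_range' o 0 o.length (by omega)]
      simp
    have hne : ¬ (n = o) := by
      intro h
      have := congrArg List.length h
      omega
    rw [PySem.List.foldl_congr_mem _ _ (fun (count : Int) (_ : Nat) => count) _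
      (by intro acc i _; rw [hmod i, if_neg hne])]
    rw [List.foldl_fixed]
  · -- diffNum ≥ 0
    rw [if_neg hd]
    set dn : Nat := ((o.length : Int) - (n.length : Int)).toNat with hdn
    have hdn' : (dn : Int) = (o.length : Int) - (n.length : Int) :=
      Int.toNat_of_nonneg (by omega)
    have hLN : o.length = n.length + dn := by omega
    have hpN : cplChar n o ≤ n.length := cplChar_le_left n o
    have hsN : cplChar n.reverse o.reverse ≤ n.length := by
      have := cplChar_le_left n.reverse o.reverse
      simpa using this
    -- rewrite A's outer fold: per i < o.length the modified string is take i ++ drop (i+dn),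
    -- and equality with n is the interval condition
    have hstep : ∀ (count : Int), ∀ i ∈ List.range o.length,
        (if n = (List.range o.length).foldl
            (fun (m : List Char) (j : Nat) =>
              if (j : Int) ∈ ((PySem.List.pyRange 0 ((o.length : Int) - (n.length : Int)) 1).map
                  (fun num => (i : Int) + num)) then m else m ++ [o[j]!])
            [] then count + 1 else count)
          = (if (n.length - cplChar n.reverse o.reverse ≤ i ∧ i ≤ min (cplChar n o) n.length)
              then count + 1 else count) := by
      intro count i hiL
      rw [List.mem_range] at hiL
      have harr : ∀ j : Nat,
          ((j : Int) ∈ ((PySem.List.pyRange 0 ((o.length : Int) - (n.length : Int)) 1).map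
            (fun num => (i : Int) + num))) ↔ (i ≤ j ∧ j < i + dn) := by
        intro j
        simp only [List.mem_map, PySem.List.mem_pyRange_one]
        constructor
        · rintro ⟨a, ⟨h0, h1⟩, h2⟩
          omega
        · rintro ⟨h1, h2⟩
          exact ⟨(j : Int) - i, by omega, by omega⟩
      have hfun : (fun (m : List Char) (j : Nat) =>
          if (j : Int) ∈ ((PySem.List.pyRange 0 ((o.length : Int) - (n.length : Int)) 1).map
              (fun num => (i : Int) + num)) then m else m ++ [o[j]!])
          = (fun (m : List Char) (j : Nat) =>
              if (i ≤ j ∧ j < i + dn) then m else m ++ [o[j]!]) := by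
        funext m j
        by_cases h : i ≤ j ∧ j < i + dn
        · rw [if_pos ((harr j).2 h), if_pos h]
        · rw [if_neg (fun hc => h ((harr j).1 hc)), if_neg h]
      rw [hfun, foldl_build_eq (fun j => o[j]!) (fun j => i ≤ j ∧ j < i + dn) o.length [],
        List.nil_append, modified_eq o i dn hiL]
      by_cases h : n = o.take i ++ o.drop (i + dn)
      · rw [if_pos h, if_pos (by
          obtain ⟨ha, hb, hc⟩ := (window_iff n o dn i hLN hiL).1 h
          exact ⟨by omega, by omega⟩)]
      · rw [if_neg h, if_neg (by
          intro hcon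
          obtain ⟨ha, hb⟩ := hcon
          exact h ((window_iff n o dn i hLN hiL).2 ⟨by omega, by omega, by omega⟩))]
    rw [PySem.List.foldl_congr_mem _ _
      (fun (count : Int) (i : Nat) =>
        if (n.length - cplChar n.reverse o.reverse ≤ i ∧ i ≤ min (cplChar n o) n.length)
        then count + 1 else count) _
      (by intro acc i hi; exact hstep acc i hi)]
    rw [foldl_count_eq
        (fun i => n.length - cplChar n.reverse o.reverse ≤ i ∧ i ≤ min (cplChar n o) n.length)
        (List.range o.length) 0,
      countP_interval o.length (n.length - cplChar n.reverse o.reverse)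
        (min (cplChar n o) n.length)]
    -- pure arithmetic on both sides
    simp only [Int.min_def, Int.max_def, Nat.min_def]
    split_ifs <;> push_cast <;> omega

-- ===== VERDICT (by name: the statement is the Claim_ definition above) =====
theorem renameFile_spec : Claim_equal_renameFile := by
  intro newName oldName _
  unfold Spec_renameFile
  exact core_eq newName oldName
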